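-- pv_equiv track=rewrite | github.com/night-slayer18/cse-2020-lab | PYTHON/hillvalley.py | hillvalley
-- ===== SOURCE A (Python) =====
-- def hillvalley(l):
--     flag=[]
--     inc=0
--     for i in range(0,len(l)-1):
--         if l[i]<=l[i+1]:
--             flag.append(0)
--         elif l[i]>=l[i+1]:
--             flag.append(1)
--     for j in range(0,len(flag)-1):
--         if flag[j]<flag[j+1]:
--             inc+=1
--         elif flag[j]>flag[j+1]:
--             inc+=1
--     if inc==1:
--         return True
--     else:
--         return False
-- ===== SOURCE B (Python) =====
-- def hillvalley(l):
--     # One pass over adjacent pairs: count maximal runs of direction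
--     # (0 = non-decreasing step, 1 = decreasing step); exactly one
--     # direction change means exactly two runs.
--     groups = 0
--     prev = None
--     for a, b in zip(l, l[1:]):
--         d = 0 if a <= b else 1
--         if d != prev:
--             groups += 1
--             prev = d
--     return groups == 2
-- ===== Notes on version B (the rewrite author's own statement) =====
-- stated objective: simpler
-- what changed: Instead of materialising a 0/1 direction list and then counting adjacent transitions in a second indexed loop, B makes a single pass over adjacent pairs counting maximal direction runs (run count == 2 iff exactly one change), with no intermediate list and no indexing.
import Mathlib
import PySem

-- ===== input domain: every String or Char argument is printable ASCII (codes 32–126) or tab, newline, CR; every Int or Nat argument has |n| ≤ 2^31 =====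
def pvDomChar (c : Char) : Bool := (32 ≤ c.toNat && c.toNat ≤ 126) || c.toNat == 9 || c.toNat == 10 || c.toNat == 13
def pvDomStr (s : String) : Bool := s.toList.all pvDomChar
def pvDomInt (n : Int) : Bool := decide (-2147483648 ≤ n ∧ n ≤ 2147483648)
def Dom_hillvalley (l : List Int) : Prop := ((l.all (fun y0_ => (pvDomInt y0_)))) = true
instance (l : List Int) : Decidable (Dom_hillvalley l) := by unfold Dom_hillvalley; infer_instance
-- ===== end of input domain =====

-- B replaces A's two indexed loops (build a 0/1 direction list, then count its adjacent
-- transitions) by a single pass over adjacent pairs that counts maximal direction runs.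

-- ===== PORT A =====
-- the first loop of A: flag = the 0/1 direction list
def pvFlagA (l : List Int) : List Int :=
  (PySem.List.pyRange 0 ((l.length : Int) - 1)).foldl
    (fun acc i =>
      if PySem.List.pyGetD l i 0 ≤ PySem.List.pyGetD l (i + 1) 0 then acc ++ [(0 : Int)]
      else if PySem.List.pyGetD l i 0 ≥ PySem.List.pyGetD l (i + 1) 0 then acc ++ [(1 : Int)]
      else acc) []
-- the second loop of A: inc = count of adjacent flag transitions
def pvIncA (flag : List Int) : Int :=
  (PySem.List.pyRange 0 ((flag.length : Int) - 1)).foldl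
    (fun inc j =>
      if PySem.List.pyGetD flag j 0 < PySem.List.pyGetD flag (j + 1) 0 then inc + 1
      else if PySem.List.pyGetD flag j 0 > PySem.List.pyGetD flag (j + 1) 0 then inc + 1
      else inc) 0

def hillvalley (l : List Int) : Bool :=
  if pvIncA (pvFlagA l) == 1 then true else false

-- ===== PORT B =====
def hillvalley_alt (l : List Int) : Bool :=
  ((l.zip l.tail).foldl
      (fun (st : Int × Option Int) ab =>
        let d : Int := if ab.1 ≤ ab.2 then 0 else 1
        if some d ≠ st.2 then (st.1 + 1, some d) else st)
      (0, none)).1 == 2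

-- ===== PRECONDITION & SPEC =====
def Spec_hillvalley (l : List Int) (out : Bool) : Prop := out = hillvalley_alt l
instance (l : List Int) (out : Bool) : Decidable (Spec_hillvalley l out) := by unfold Spec_hillvalley; infer_instance

-- ===== CLAIM (what is proved, stated in full; the proofs are below) =====
def Claim_equal_hillvalley : Prop := ∀ (l : List Int), Dom_hillvalley l → Spec_hillvalley l (hillvalley l)

-- ===== LEMMAS AND PROOFS =====

-- the direction list A's first loop builds, written structurally
def pvDirs (l : List Int) : List Int :=
  (l.zip l.tail).map (fun p => if p.1 ≤ p.2 then 0 else 1)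

-- the transition count A's second loop computes, written structurally
def pvChg (f : List Int) : Int :=
  ((f.zip f.tail).map (fun q => if q.1 < q.2 then (1 : Int) else if q.1 > q.2 then 1 else 0)).sum

-- B's loop body, named
def pvStep (st : Int × Option Int) (d : Int) : Int × Option Int :=
  if some d ≠ st.2 then (st.1 + 1, some d) else st

lemma pvMapAdj {β : Type} (xs : List Int) (g : Int → Int → β) :
    (PySem.List.pyRange 0 ((xs.length : Int) - 1)).map
        (fun i => g (PySem.List.pyGetD xs i 0) (PySem.List.pyGetD xs (i + 1) 0))
      = (xs.zip xs.tail).map (fun p => g p.1 p.2) := by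
  cases xs with
  | nil =>
      have h : PySem.List.pyRange 0 ((([] : List Int).length : Int) - 1) = [] := rfl
      rw [h]; rfl
  | cons a t =>
      have h : (((a :: t).length : Int) - 1) = ((t.length : Nat) : Int) := by simp
      rw [h, PySem.List.pyRange_zero_natCast, List.map_map]
      apply List.ext_getElem
      · simp [List.length_zip]
      · intro k h1 h2
        simp only [List.length_map, List.length_range] at h1
        have hk1 : k + 1 < (a :: t).length := by simpa using Nat.succ_lt_succ h1
        have e1 : PySem.List.pyGetD (a :: t) ((k : Nat) : Int) 0 = (a :: t).getD k 0 :=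
          PySem.List.pyGetD_natCast _ _ _
        have e2 : PySem.List.pyGetD (a :: t) (((k : Nat) : Int) + 1) 0 = (a :: t).getD (k + 1) 0 := by
          have : (((k : Nat) : Int) + 1) = (((k + 1 : Nat) : Nat) : Int) := by push_cast; ring
          rw [this, PySem.List.pyGetD_natCast]
        simp only [List.getElem_map, List.getElem_range, Function.comp, List.getElem_zip]
        rw [e1, e2, List.getD_eq_getElem _ _ (by simpa using Nat.lt_succ_of_lt h1),
            List.getD_eq_getElem _ _ hk1]
        simp [List.getElem_cons_succ]

lemma pvFlagEq (l : List Int) : pvFlagA l = pvDirs l := by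
  rw [pvFlagA, PySem.List.foldl_congr_mem _ _
      (fun acc i => acc ++ [if PySem.List.pyGetD l i 0 ≤ PySem.List.pyGetD l (i + 1) 0
                            then (0 : Int) else 1])
      _ ?_]
  · rw [PySem.List.foldl_append_singleton_eq_map]
    simpa [pvDirs] using pvMapAdj l (fun a b => if a ≤ b then (0 : Int) else 1)
  · intro acc x _
    by_cases h1 : PySem.List.pyGetD l x 0 ≤ PySem.List.pyGetD l (x + 1) 0
    · simp [h1]
    · have h2 : PySem.List.pyGetD l x 0 ≥ PySem.List.pyGetD l (x + 1) 0 := by omega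
      simp [h1, h2]

lemma pvIncEq (f : List Int) : pvIncA f = pvChg f := by
  rw [pvIncA, PySem.List.foldl_congr_mem _ _
      (fun inc j => inc + (if PySem.List.pyGetD f j 0 < PySem.List.pyGetD f (j + 1) 0 then (1 : Int)
                           else if PySem.List.pyGetD f j 0 > PySem.List.pyGetD f (j + 1) 0 then 1
                           else 0))
      _ ?_]
  · rw [PySem.List.foldl_add]
    have hs := congrArg List.sum (pvMapAdj f
      (fun a b => if a < b then (1 : Int) else if a > b then 1 else 0))
    simpa [pvChg] using hs
  · intro acc x _
    by_cases h1 : PySem.List.pyGetD f x 0 < PySem.List.pyGetD f (x + 1) 0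
    · simp [h1]
    · by_cases h2 : PySem.List.pyGetD f x 0 > PySem.List.pyGetD f (x + 1) 0
      · simp [h1, h2]
      · simp [h1, h2]

lemma pvChg_cons_cons (x y : Int) (t : List Int) :
    pvChg (x :: y :: t) = (if x < y then (1 : Int) else if x > y then 1 else 0) + pvChg (y :: t) := by
  simp [pvChg]

lemma pvRun (ds : List Int) (c : Int) (p : Int) :
    (ds.foldl pvStep (c, some p)).1 = c + pvChg (p :: ds) := by
  induction ds generalizing c p with
  | nil => simp [pvChg]
  | cons d t ih =>
      by_cases h : p = d
      · subst h
        have hs : pvStep (c, some p) p = (c, some p) := by simp [pvStep]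
        rw [List.foldl_cons, hs, ih, pvChg_cons_cons]
        simp
      · have h' : d ≠ p := fun e => h e.symm
        have hs : pvStep (c, some p) d = (c + 1, some d) := by simp [pvStep, h']
        rw [List.foldl_cons, hs, ih, pvChg_cons_cons]
        split_ifs <;> omega

-- ===== VERDICT (by name: the statement is the Claim_ definition above) =====
theorem hillvalley_spec : Claim_equal_hillvalley := by
  intro l _
  unfold Spec_hillvalley hillvalley hillvalley_alt
  rw [pvFlagEq, pvIncEq]
  have hb : (l.zip l.tail).foldl
      (fun (st : Int × Option Int) ab =>
        let d : Int := if ab.1 ≤ ab.2 then 0 else 1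
        if some d ≠ st.2 then (st.1 + 1, some d) else st)
      (0, none)
      = (pvDirs l).foldl pvStep (0, none) := by
    rw [pvDirs, List.foldl_map]
    rfl
  rw [hb]
  cases hd : pvDirs l with
  | nil => simp [pvChg]
  | cons d t =>
      have hs : pvStep (0, none) d = (1, some d) := by simp [pvStep]
      rw [List.foldl_cons, hs]
      have hr := pvRun t 1 d
      rcases h : (t.foldl pvStep (1, some d)) with ⟨c, q⟩
      rw [h] at hr
      simp only at hr
      have : pvChg (d :: t) = c - 1 := by omega
      rw [this]
      by_cases hc : c = 2
      · subst hc; norm_num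
      · have h1 : ¬ (c - 1 == (1:Int)) = true := by simp; omega
        have h2 : ¬ (c == (2:Int)) = true := by simp; omega
        simp [h1, h2]
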